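-- pv_equiv track=rewrite | github.com/0lai0/RCAEval | RCAEval/e2e/grumvgc.py | _is_same_service
-- ===== SOURCE A (Python) =====
-- def _is_same_service(name1, name2):
--     """判斷兩個特徵是否屬於同一個服務"""
--     # 簡單的啟發式規則：檢查服務名稱前綴
--     service_prefixes = [
--         'adservice', 'cartservice', 'checkoutservice', 'currencyservice',
--         'emailservice', 'frontend', 'paymentservice', 'productcatalogservice',
--         'recommendationservice', 'redis', 'shippingservice'
--     ]
--
--     for prefix in service_prefixes:
--         if name1.startswith(prefix) and name2.startswith(prefix):
--             return True
--
--     return False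
-- ===== SOURCE B (Python) =====
-- SERVICE_PREFIXES = [
--     'adservice', 'cartservice', 'checkoutservice', 'currencyservice',
--     'emailservice', 'frontend', 'paymentservice', 'productcatalogservice',
--     'recommendationservice', 'redis', 'shippingservice'
-- ]
--
--
-- def _get_service(name):
--     """Return the (unique) service prefix that name starts with, or None."""
--     for prefix in SERVICE_PREFIXES:
--         if name.startswith(prefix):
--             return prefix
--     return None
--
--
-- def _is_same_service(name1, name2):
--     """判斷兩個特徵是否屬於同一個服務"""
--     s1 = _get_service(name1)
--     s2 = _get_service(name2)
--     return s1 is not None and s1 == s2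
-- ===== Notes on version B (the rewrite author's own statement) =====
-- stated objective: alternative
-- what changed: B resolves each name to its service independently via a first-match helper and compares the two results, instead of A's joint scan testing both names against every prefix; correctness of the comparison relies on the prefixes being mutually non-overlapping.
import Mathlib
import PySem

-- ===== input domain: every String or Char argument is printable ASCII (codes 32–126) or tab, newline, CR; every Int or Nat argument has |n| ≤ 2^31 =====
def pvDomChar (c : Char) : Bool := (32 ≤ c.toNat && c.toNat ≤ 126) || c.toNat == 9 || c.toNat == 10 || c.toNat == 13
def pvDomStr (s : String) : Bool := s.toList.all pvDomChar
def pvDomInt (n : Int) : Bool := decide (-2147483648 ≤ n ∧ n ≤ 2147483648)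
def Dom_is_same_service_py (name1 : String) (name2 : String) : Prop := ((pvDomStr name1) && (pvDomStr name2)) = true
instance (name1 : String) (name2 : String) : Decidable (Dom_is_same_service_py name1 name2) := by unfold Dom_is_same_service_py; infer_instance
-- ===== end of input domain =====

-- One honest line: B maps each name independently to its first matching service prefix and
-- compares the two results, instead of A's joint scan testing both names against every prefix.

-- the shared constant prefix list (identical in Source A and Source B)
def pvServicePrefixes : List String :=
  ["adservice", "cartservice", "checkoutservice", "currencyservice",
   "emailservice", "frontend", "paymentservice", "productcatalogservice",
   "recommendationservice", "redis", "shippingservice"]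

-- ===== PORT A =====
-- the `for prefix in service_prefixes: if n1.startswith(p) and n2.startswith(p): return True` loop
def pvLoopA (name1 : String) (name2 : String) : List String → Bool
  | [] => false
  | p :: rest =>
      if PySem.Str.startswith name1 p && PySem.Str.startswith name2 p then true
      else pvLoopA name1 name2 rest

def is_same_service_py (name1 : String) (name2 : String) : Bool :=
  pvLoopA name1 name2 pvServicePrefixes

-- ===== PORT B =====
-- _get_service: first prefix of the list that name starts with, else None
def pvGetService (name : String) : Option String :=
  pvServicePrefixes.find? (fun p => PySem.Str.startswith name p)

def is_same_service_py_alt (name1 : String) (name2 : String) : Bool :=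
  match pvGetService name1, pvGetService name2 with
  | some s1, some s2 => s1 == s2
  | _, _ => false

-- ===== PRECONDITION & SPEC =====
def Spec_is_same_service_py (name1 : String) (name2 : String) (out : Bool) : Prop := out = is_same_service_py_alt name1 name2
instance (name1 : String) (name2 : String) (out : Bool) : Decidable (Spec_is_same_service_py name1 name2 out) := by unfold Spec_is_same_service_py; infer_instance

-- ===== CLAIM (what is proved, stated in full; the proofs are below) =====
def Claim_equal_is_same_service_py : Prop := ∀ (name1 : String) (name2 : String), Dom_is_same_service_py name1 name2 → Spec_is_same_service_py name1 name2 (is_same_service_py name1 name2)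

-- ===== LEMMAS AND PROOFS =====

-- no prefix of the list is a (list-of-chars) prefix of a different one
theorem pvNoOverlap : ∀ p ∈ pvServicePrefixes, ∀ q ∈ pvServicePrefixes,
    p.toList <+: q.toList → p = q := by decide

-- a name starts with at most one prefix of the list
theorem pvUnique (name : String) :
    ∀ p ∈ pvServicePrefixes, ∀ q ∈ pvServicePrefixes,
    PySem.Str.startswith name p = true → PySem.Str.startswith name q = true → p = q := by
  intro p hp q hq h1 h2
  rw [PySem.Str.startswith_eq, PySem.Chars.startswith_iff] at h1 h2
  rcases List.prefix_or_prefix_of_prefix h1 h2 with h | h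
  · exact pvNoOverlap p hp q hq h
  · exact (pvNoOverlap q hq p hp h).symm

theorem pvLoopA_iff (name1 name2 : String) (ps : List String) :
    pvLoopA name1 name2 ps = true ↔
    ∃ p ∈ ps, PySem.Str.startswith name1 p = true ∧ PySem.Str.startswith name2 p = true := by
  induction ps with
  | nil =>
      constructor
      · intro h; cases h
      · rintro ⟨q, hq, -, -⟩; cases hq
  | cons p rest ih =>
      simp only [pvLoopA]
      by_cases h : (PySem.Str.startswith name1 p && PySem.Str.startswith name2 p) = true
      · rw [if_pos h]
        rw [Bool.and_eq_true] at h
        exact ⟨fun _ => ⟨p, List.mem_cons_self, h.1, h.2⟩, fun _ => rfl⟩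
      · rw [if_neg h, ih]
        constructor
        · rintro ⟨q, hq, h1, h2⟩; exact ⟨q, List.mem_cons_of_mem _ hq, h1, h2⟩
        · rintro ⟨q, hq, h1, h2⟩
          rcases List.mem_cons.mp hq with rfl | hq
          · exact absurd (by rw [h1, h2]; rfl) h
          · exact ⟨q, hq, h1, h2⟩

-- ===== VERDICT (by name: the statement is the Claim_ definition above) =====
theorem is_same_service_py_spec : Claim_equal_is_same_service_py := by
  intro name1 name2 _
  unfold Spec_is_same_service_py is_same_service_py
  by_cases h : ∃ p ∈ pvServicePrefixes,
      PySem.Str.startswith name1 p = true ∧ PySem.Str.startswith name2 p = true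
  · rcases h with ⟨p, hp, h1, h2⟩
    rw [(pvLoopA_iff name1 name2 pvServicePrefixes).mpr ⟨p, hp, h1, h2⟩]
    have hf1 : ∃ q, pvGetService name1 = some q := by
      unfold pvGetService
      rcases Option.isSome_iff_exists.mp (List.find?_isSome.mpr ⟨p, hp, h1⟩) with ⟨q, hq⟩
      exact ⟨q, hq⟩
    have hf2 : ∃ q, pvGetService name2 = some q := by
      unfold pvGetService
      rcases Option.isSome_iff_exists.mp (List.find?_isSome.mpr ⟨p, hp, h2⟩) with ⟨q, hq⟩
      exact ⟨q, hq⟩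
    rcases hf1 with ⟨q1, hq1⟩
    rcases hf2 with ⟨q2, hq2⟩
    have hq1m := List.mem_of_find?_eq_some hq1
    have hq1s := List.find?_some hq1
    have hq2m := List.mem_of_find?_eq_some hq2
    have hq2s := List.find?_some hq2
    have e1 : q1 = p := pvUnique name1 q1 hq1m p hp hq1s h1
    have e2 : q2 = p := pvUnique name2 q2 hq2m p hp hq2s h2
    simp [is_same_service_py_alt, hq1, hq2, e1, e2]
  · rw [Bool.eq_iff_iff] at *
    constructor
    · intro ht
      exact absurd ((pvLoopA_iff name1 name2 pvServicePrefixes).mp ht) h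
    · intro ht
      exfalso
      unfold is_same_service_py_alt at ht
      cases hq1 : pvGetService name1 with
      | none => rw [hq1] at ht; cases hq2 : pvGetService name2 <;> rw [hq2] at ht <;> simp at ht
      | some s1 =>
        cases hq2 : pvGetService name2 with
        | none => rw [hq1, hq2] at ht; simp at ht
        | some s2 =>
          rw [hq1, hq2] at ht
          have hs : s1 = s2 := by simpa using ht
          exact h ⟨s1, List.mem_of_find?_eq_some hq1, List.find?_some hq1,
            hs ▸ List.find?_some hq2⟩
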